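-- pv_equiv track=rewrite | github.com/CbGames09/beetwaesserung | esp32/ntp_sync.py | is_dst
-- ===== SOURCE A (Python) =====
-- def is_dst(year, month, day, hour):
--     """
--     Check if DST is active in Germany/EU
--     DST: Last Sunday in March 02:00 to last Sunday in October 03:00
--     """
--     # Find last Sunday in March
--     march_last_sunday = 31
--     while march_last_sunday > 0:
--         m, y, d = 3, year, march_last_sunday
--         if m < 3:
--             m += 12
--             y -= 1
--         weekday = (d + ((13 * (m + 1)) // 5) + y + (y // 4) - (y // 100) + (y // 400)) % 7
--         if weekday == 0:  # Sunday
--             break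
--         march_last_sunday -= 1
--
--     # Find last Sunday in October
--     october_last_sunday = 31
--     while october_last_sunday > 0:
--         m, y, d = 10, year, october_last_sunday
--         weekday = (d + ((13 * (m + 1)) // 5) + y + (y // 4) - (y // 100) + (y // 400)) % 7
--         if weekday == 0:  # Sunday
--             break
--         october_last_sunday -= 1
--
--     # Check if DST is active
--     if month < 3 or month > 10:
--         return False
--     elif month > 3 and month < 10:
--         return True
--     elif month == 3:
--         if day < march_last_sunday:
--             return False
--         elif day > march_last_sunday:
--             return True
--         else:
--             return hour >= 2
--     else:  # month == 10
--         if day < october_last_sunday: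
--             return True
--         elif day > october_last_sunday:
--             return False
--         else:
--             return hour < 3
-- ===== SOURCE B (Python) =====
-- def _dow31(year, m):
--     # Zeller-style weekday (0 = Sunday) of day 31 of month m (m >= 3) in `year`
--     return (31 + (13 * (m + 1)) // 5 + year + year // 4 - year // 100 + year // 400) % 7
--
-- def is_dst(year, month, day, hour):
--     if month < 3 or month > 10:
--         return False
--     if 3 < month < 10:
--         return True
--     if month == 3:
--         ls = 31 - _dow31(year, 3)
--         return day > ls or (day == ls and hour >= 2)
--     ls = 31 - _dow31(year, 10)
--     return day < ls or (day == ls and hour < 3)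
-- ===== Notes on version B (the rewrite author's own statement) =====
-- stated objective: simpler
-- what changed: B replaces A's two backwards while-loop scans for the last Sunday by a closed-form '31 minus Zeller weekday of the 31st' computation and flattens each tie cascade into one boolean expression.
import Mathlib
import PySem

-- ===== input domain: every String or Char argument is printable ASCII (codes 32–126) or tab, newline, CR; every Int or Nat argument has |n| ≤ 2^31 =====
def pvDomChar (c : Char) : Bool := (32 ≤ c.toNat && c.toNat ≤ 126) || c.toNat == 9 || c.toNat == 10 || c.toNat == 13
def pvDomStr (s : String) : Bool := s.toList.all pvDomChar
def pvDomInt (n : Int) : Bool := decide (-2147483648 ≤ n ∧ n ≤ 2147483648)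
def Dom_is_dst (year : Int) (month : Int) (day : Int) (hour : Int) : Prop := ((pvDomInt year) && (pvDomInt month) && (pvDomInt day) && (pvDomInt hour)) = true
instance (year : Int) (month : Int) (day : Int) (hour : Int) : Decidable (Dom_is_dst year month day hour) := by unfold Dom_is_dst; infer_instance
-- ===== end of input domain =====

-- B replaces A's two ≤31-iteration backwards weekday scans by a closed-form
-- "31 minus weekday-of-the-31st" computation (objective: simpler).

-- ===== PORT A =====
-- A's March while-loop: counts down from 31 until the weekday formula says Sunday
-- (fuel 31 bounds the ≤31 iterations; the loop exits anyway at d = 0, matching Python).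
def isDstMarchLoop (year : Int) : Nat → Int → Int
  | 0, d => d
  | fuel + 1, d =>
    if d > 0 then
      let m : Int := 3
      let y : Int := year
      let dd : Int := d
      let p := if m < 3 then (m + 12, y - 1) else (m, y)
      let m := p.1
      let y := p.2
      let weekday := PySem.Int.mod (dd + PySem.Int.floordiv (13 * (m + 1)) 5 + y + PySem.Int.floordiv y 4 - PySem.Int.floordiv y 100 + PySem.Int.floordiv y 400) 7
      if weekday == 0 then d else isDstMarchLoop year fuel (d - 1)
    else d

-- A's October while-loop (no month-adjustment branch in the Python source).
def isDstOctLoop (year : Int) : Nat → Int → Int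
  | 0, d => d
  | fuel + 1, d =>
    if d > 0 then
      let m : Int := 10
      let y : Int := year
      let dd : Int := d
      let weekday := PySem.Int.mod (dd + PySem.Int.floordiv (13 * (m + 1)) 5 + y + PySem.Int.floordiv y 4 - PySem.Int.floordiv y 100 + PySem.Int.floordiv y 400) 7
      if weekday == 0 then d else isDstOctLoop year fuel (d - 1)
    else d

def is_dst (year : Int) (month : Int) (day : Int) (hour : Int) : Bool :=
  let march_last_sunday := isDstMarchLoop year 31 31
  let october_last_sunday := isDstOctLoop year 31 31
  if month < 3 || month > 10 then false
  else if month > 3 && month < 10 then true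
  else if month == 3 then
    if day < march_last_sunday then false
    else if day > march_last_sunday then true
    else decide (hour ≥ 2)
  else
    if day < october_last_sunday then true
    else if day > october_last_sunday then false
    else decide (hour < 3)

-- ===== PORT B =====
-- weekday (0 = Sunday) of day 31 of month m in `year`, closed form
def dow31 (year : Int) (m : Int) : Int :=
  PySem.Int.mod (31 + PySem.Int.floordiv (13 * (m + 1)) 5 + year + PySem.Int.floordiv year 4 - PySem.Int.floordiv year 100 + PySem.Int.floordiv year 400) 7

def is_dst_alt (year : Int) (month : Int) (day : Int) (hour : Int) : Bool :=
  if month < 3 || month > 10 then false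
  else if 3 < month && month < 10 then true
  else if month == 3 then
    let ls := 31 - dow31 year 3
    day > ls || (day == ls && decide (hour ≥ 2))
  else
    let ls := 31 - dow31 year 10
    day < ls || (day == ls && decide (hour < 3))

-- ===== PRECONDITION & SPEC =====
def Spec_is_dst (year : Int) (month : Int) (day : Int) (hour : Int) (out : Bool) : Prop := out = is_dst_alt year month day hour
instance (year : Int) (month : Int) (day : Int) (hour : Int) (out : Bool) : Decidable (Spec_is_dst year month day hour out) := by unfold Spec_is_dst; infer_instance

-- ===== CLAIM (what is proved, stated in full; the proofs are below) =====
def Claim_equal_is_dst : Prop := ∀ (year : Int) (month : Int) (day : Int) (hour : Int), Dom_is_dst year month day hour → Spec_is_dst year month day hour (is_dst year month day hour)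

-- ===== LEMMAS AND PROOFS =====

lemma marchLoop_stop (year : Int) (fuel : Nat) (d : Int) (hd : d > 0)
    (h : (d + 10 + year + year / 4 - year / 100 + year / 400) % 7 = 0) :
    isDstMarchLoop year (fuel + 1) d = d := by
  simp only [isDstMarchLoop, if_pos hd]
  norm_num
  intro hn; omega

lemma marchLoop_go (year : Int) (fuel : Nat) (d : Int) (hd : d > 0)
    (h : (d + 10 + year + year / 4 - year / 100 + year / 400) % 7 ≠ 0) :
    isDstMarchLoop year (fuel + 1) d = isDstMarchLoop year fuel (d - 1) := by
  simp only [isDstMarchLoop, if_pos hd]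
  norm_num
  intro hn; omega

-- the March scan from d stops after exactly k steps when the weekday offset of d is k
lemma march_down (year : Int) : ∀ (k fuel : Nat) (d : Int), k < fuel → (k : Int) < d →
    (d + 10 + year + year / 4 - year / 100 + year / 400) % 7 = k →
    isDstMarchLoop year fuel d = d - k := by
  intro k
  induction k with
  | zero =>
    intro fuel d hf hd h
    obtain ⟨f, rfl⟩ : ∃ f, fuel = f + 1 := ⟨fuel - 1, by omega⟩
    rw [marchLoop_stop year f d (by omega) (by omega)]; omega
  | succ k ih =>
    intro fuel d hf hd h
    obtain ⟨f, rfl⟩ : ∃ f, fuel = f + 1 := ⟨fuel - 1, by omega⟩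
    rw [marchLoop_go year f d (by omega) (by omega),
        ih f (d - 1) (by omega) (by omega) (by push_cast at h ⊢; omega)]
    omega

lemma march_closed (year : Int) : isDstMarchLoop year 31 31 = 31 - dow31 year 3 := by
  have hdow : dow31 year 3 = (31 + 10 + year + year/4 - year/100 + year/400) % 7 := by
    norm_num [dow31]
  have h0 : 0 ≤ (31 + 10 + year + year/4 - year/100 + year/400) % 7 := Int.emod_nonneg _ (by norm_num)
  have h7 : (31 + 10 + year + year/4 - year/100 + year/400) % 7 < 7 := Int.emod_lt_of_pos _ (by norm_num)
  rw [march_down year ((31 + 10 + year + year/4 - year/100 + year/400) % 7).toNat 31 31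
        (by omega) (by omega) (by push_cast; omega)]
  omega

lemma octLoop_stop (year : Int) (fuel : Nat) (d : Int) (hd : d > 0)
    (h : (d + 28 + year + year / 4 - year / 100 + year / 400) % 7 = 0) :
    isDstOctLoop year (fuel + 1) d = d := by
  simp only [isDstOctLoop, if_pos hd]
  norm_num
  intro hn; omega

lemma octLoop_go (year : Int) (fuel : Nat) (d : Int) (hd : d > 0)
    (h : (d + 28 + year + year / 4 - year / 100 + year / 400) % 7 ≠ 0) :
    isDstOctLoop year (fuel + 1) d = isDstOctLoop year fuel (d - 1) := by
  simp only [isDstOctLoop, if_pos hd]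
  norm_num
  intro hn; omega

-- the October scan from d stops after exactly k steps when the weekday offset of d is k
lemma oct_down (year : Int) : ∀ (k fuel : Nat) (d : Int), k < fuel → (k : Int) < d →
    (d + 28 + year + year / 4 - year / 100 + year / 400) % 7 = k →
    isDstOctLoop year fuel d = d - k := by
  intro k
  induction k with
  | zero =>
    intro fuel d hf hd h
    obtain ⟨f, rfl⟩ : ∃ f, fuel = f + 1 := ⟨fuel - 1, by omega⟩
    rw [octLoop_stop year f d (by omega) (by omega)]; omega
  | succ k ih =>
    intro fuel d hf hd h
    obtain ⟨f, rfl⟩ : ∃ f, fuel = f + 1 := ⟨fuel - 1, by omega⟩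
    rw [octLoop_go year f d (by omega) (by omega),
        ih f (d - 1) (by omega) (by omega) (by push_cast at h ⊢; omega)]
    omega

lemma oct_closed (year : Int) : isDstOctLoop year 31 31 = 31 - dow31 year 10 := by
  have hdow : dow31 year 10 = (31 + 28 + year + year/4 - year/100 + year/400) % 7 := by
    norm_num [dow31]
  have h0 : 0 ≤ (31 + 28 + year + year/4 - year/100 + year/400) % 7 := Int.emod_nonneg _ (by norm_num)
  have h7 : (31 + 28 + year + year/4 - year/100 + year/400) % 7 < 7 := Int.emod_lt_of_pos _ (by norm_num)
  rw [oct_down year ((31 + 28 + year + year/4 - year/100 + year/400) % 7).toNat 31 31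
        (by omega) (by omega) (by push_cast; omega)]
  omega

-- ===== VERDICT (by name: the statement is the Claim_ definition above) =====
theorem is_dst_spec : Claim_equal_is_dst := by
  intro year month day hour _
  unfold Spec_is_dst is_dst is_dst_alt
  rw [march_closed, oct_closed]
  simp only [Bool.or_eq_true, decide_eq_true_eq, Bool.and_eq_true, beq_iff_eq, gt_iff_lt]
  split_ifs with h1 h2 h3 h4 h5 h6 h7 <;>
    simp_all [beq_iff_eq] <;>
    first
      | omega
      | simp [show day = 31 - dow31 year 3 from by omega]
      | simp [show day = 31 - dow31 year 10 from by omega]
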